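-- pv_equiv track=rewrite | github.com/sebastianrodriguez1115/CSStudies | 4. Trees/findSubstrings.py | solution
-- ===== SOURCE A (Python) =====
-- class Node:
--   def __init__(self, value):
--     self.left = None
--     self.right = None
--     self.value = value
--
-- def solution(words, parts):
--   answer = []
--   parts.sort()
--   max_part_len = 5
--   bst = parts_bst(parts)
--   for word in words:
--     word_len = len(word)
--     new_word = word
--     for length in range(max_part_len + 1, 0, -1):
--       for char_index in range(word_len - length + 1):
--         if search_bst(bst, word[char_index:char_index + length]):
--           new_word = f"{word[:char_index]}[{word[char_index:char_index + length]}]{word[char_index + length:]}"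
--           break
--       if new_word != word:
--         break
--     answer.append(new_word)
--
--   return answer
--
-- def parts_bst(parts):
--   if len(parts) == 0:
--     return None
--
--   mid = len(parts) // 2
--   root = Node(parts[mid])
--   root.left = parts_bst(parts[:mid])
--   root.right = parts_bst(parts[mid + 1:])
--
--   return root
--
-- def search_bst(bst, word):
--   if bst is None:
--     return False
--
--   if bst.value == word:
--     return True
--   elif bst.value < word:
--     return search_bst(bst.right, word)
--   elif bst.value > word:
--     return search_bst(bst.left, word)
--   else:
--     return False
-- ===== SOURCE B (Python) =====
-- def solution(words, parts):
--     parts.sort()  # kept for A's observable in-place mutation of `parts`; B's result does not depend on it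
--     usable = [p for p in parts if 1 <= len(p) <= 6]
--     answer = []
--     for word in words:
--         best = None  # (part_len, pos, part): longest part found in word, leftmost first occurrence
--         for p in usable:
--             pos = word.find(p)
--             if pos == -1:
--                 continue
--             if best is None or (len(p), -pos) > (best[0], -best[1]):
--                 best = (len(p), pos, p)
--         if best is None:
--             answer.append(word)
--         else:
--             L, pos, p = best
--             answer.append(word[:pos] + "[" + p + "]" + word[pos + L:])
--     return answer
-- ===== Notes on version B (the rewrite author's own statement) =====
-- stated objective: alternative
-- what changed: Instead of generating every substring of each word (lengths 6 down to 1) and looking each one up in a hand-built balanced BST of the sorted parts, B makes a single pass over the usable (length 1..6) parts per word using str.find and keeps the best candidate under the key (length, -position), then wraps it; parts.sort() is kept only for A's observable in-place mutation.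
import Mathlib
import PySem

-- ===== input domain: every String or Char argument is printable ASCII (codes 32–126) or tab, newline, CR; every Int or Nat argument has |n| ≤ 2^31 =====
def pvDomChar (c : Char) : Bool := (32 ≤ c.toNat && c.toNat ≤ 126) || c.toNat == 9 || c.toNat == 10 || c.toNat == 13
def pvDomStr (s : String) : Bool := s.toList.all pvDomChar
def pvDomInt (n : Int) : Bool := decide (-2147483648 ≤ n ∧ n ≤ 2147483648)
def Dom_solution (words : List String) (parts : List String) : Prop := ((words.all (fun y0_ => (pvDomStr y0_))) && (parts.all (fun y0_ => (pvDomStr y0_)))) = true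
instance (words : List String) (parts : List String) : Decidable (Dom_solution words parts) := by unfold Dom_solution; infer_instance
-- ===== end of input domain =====

-- B replaces A's substring-generation + hand-built BST with one pass over the length-1..6 parts per word
-- (str.find, best by (length, -position)); A also sorts `parts` in place — the equivalence proved here is
-- about the return value (B performs the same mutation in Python).

-- ===== PORT A =====
-- Port A works on `String.toList` (Python str <, ==, slicing are exact on the char-list side).
inductive PVNode where
  | nil : PVNode
  | node : PVNode → List Char → PVNode → PVNode
deriving DecidableEq, Repr

-- parts_bst(parts): balanced BST from the (sorted) list, by slicing around the middle element.
def parts_bst (l : List (List Char)) : PVNode :=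
  if h : l.length = 0 then PVNode.nil
  else
    let mid : Int := PySem.Int.floordiv (PySem.List.len l) 2
    PVNode.node (parts_bst (PySem.List.slice l none (some mid)))
      (PySem.List.pyGetD l mid [])   -- parts[mid]; exact: 0 ≤ mid = len//2 < len here
      (parts_bst (PySem.List.slice l (some (mid + 1)) none))
termination_by l.length
decreasing_by
  all_goals
    have hm : PySem.Int.floordiv (PySem.List.len l) 2 = ((l.length / 2 : Nat) : Int) := by
      rw [PySem.List.len_eq]; exact_mod_cast PySem.Int.floordiv_natCast l.length 2
  · rw [hm, PySem.List.slice_to_natCast, List.length_take]; omega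
  · have hm1 : PySem.Int.floordiv (PySem.List.len l) 2 + 1 = ((l.length / 2 + 1 : Nat) : Int) := by
      rw [hm]; push_cast; ring
    rw [hm1, PySem.List.slice_from_natCast, List.length_drop]; omega

def search_bst : PVNode → List Char → Bool
  | PVNode.nil, _ => false
  | PVNode.node lft v rgt, wrd =>
    if v = wrd then true
    else if v < wrd then search_bst rgt wrd
    else if wrd < v then search_bst lft wrd   -- 'bst.value > word'
    else false

-- inner 'for char_index in range(...)' with its break: first index whose substring is in the BST
def pvAInner (bst : PVNode) (w : List Char) (L : Int) : List Int → Option (List Char)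
  | [] => none
  | i :: rest =>
    if search_bst bst (PySem.List.slice w (some i) (some (i + L))) then
      some (PySem.List.slice w none (some i) ++
            '[' :: (PySem.List.slice w (some i) (some (i + L)) ++
            ']' :: PySem.List.slice w (some (i + L)) none))
    else pvAInner bst w L rest

-- outer 'for length in range(max_part_len + 1, 0, -1)' with its 'if new_word != word: break'
def pvAOuter (bst : PVNode) (w : List Char) : List Int → List Char
  | [] => w
  | L :: rest =>
    let nw := (pvAInner bst w L (PySem.List.pyRange 0 (PySem.Chars.len w - L + 1) 1)).getD w
    if nw ≠ w then nw else pvAOuter bst w rest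

def solution (words : List String) (parts : List String) : List String :=
  let sortedParts := PySem.List.sorted (parts.map String.toList) (fun x => x) false
  let max_part_len : Int := 5
  let bst := parts_bst sortedParts
  words.foldl
    (fun answer word =>
      answer ++ [String.ofList (pvAOuter bst word.toList
        (PySem.List.pyRange (max_part_len + 1) 0 (-1)))]) []

-- ===== PORT B =====
-- one fold over the usable parts keeping best = (len(p), pos, p), Python tuple order on (len(p), -pos)
def pvBStep (w : List Char) (best : Option (Int × Int × List Char)) (p : List Char) :
    Option (Int × Int × List Char) :=
  let pos := PySem.Chars.find w p
  if pos = -1 then best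
  else
    match best with
    | none => some (PySem.Chars.len p, pos, p)
    | some (bl, bpos, _) =>
      if PySem.Chars.len p > bl ∨ (PySem.Chars.len p = bl ∧ -pos > -bpos) then
        some (PySem.Chars.len p, pos, p)
      else best

def pvBWord (w : List Char) (usable : List (List Char)) : List Char :=
  match usable.foldl (pvBStep w) none with
  | none => w
  | some (L, pos, p) =>
      PySem.List.slice w none (some pos) ++
        '[' :: (p ++ ']' :: PySem.List.slice w (some (pos + L)) none)

def solution_alt (words : List String) (parts : List String) : List String :=
  let sp := PySem.List.sorted (parts.map String.toList) (fun x => x) false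
  let usable := sp.filter (fun p => decide (1 ≤ PySem.Chars.len p ∧ PySem.Chars.len p ≤ 6))
  words.foldl (fun answer word => answer ++ [String.ofList (pvBWord word.toList usable)]) []

-- ===== PRECONDITION & SPEC =====
def Spec_solution (words : List String) (parts : List String) (out : List String) : Prop := out = solution_alt words parts
instance (words : List String) (parts : List String) (out : List String) : Decidable (Spec_solution words parts out) := by unfold Spec_solution; infer_instance

-- ===== CLAIM (what is proved, stated in full; the proofs are below) =====
def Claim_equal_solution : Prop := ∀ (words : List String) (parts : List String), Dom_solution words parts → Spec_solution words parts (solution words parts)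

-- ===== LEMMAS AND PROOFS =====

-- a word slice of length L starting at i that is one of the parts
def pvHitB (S : List (List Char)) (w : List Char) (L i : Nat) : Bool :=
  decide (i + L ≤ w.length ∧ (w.drop i).take L ∈ S)

def pvExHitB (S : List (List Char)) (w : List Char) (L : Nat) : Bool :=
  (List.range (w.length + 1)).any (pvHitB S w L)

lemma pvExHitB_iff (S : List (List Char)) (w : List Char) (L : Nat) :
    pvExHitB S w L = true ↔ ∃ i, pvHitB S w L i = true := by
  unfold pvExHitB
  rw [List.any_eq_true]
  constructor
  · rintro ⟨i, _, hi⟩; exact ⟨i, hi⟩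
  · rintro ⟨i, hi⟩
    refine ⟨i, List.mem_range.2 ?_, hi⟩
    have := (decide_eq_true_iff.1 hi).1
    omega

def pvFirstIdx (S : List (List Char)) (w : List Char) (L : Nat) : Nat :=
  if h : pvExHitB S w L = true then Nat.find ((pvExHitB_iff S w L).1 h) else 0

-- search_bst on the BST of a (≤)-sorted list is list membership
lemma search_parts_bst_aux (n : Nat) : ∀ (l : List (List Char)), l.length ≤ n →
    l.Pairwise (· ≤ ·) → ∀ (w : List Char),
    search_bst (parts_bst l) w = decide (w ∈ l) := by
  induction n with
  | zero =>
    intro l hl _ w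
    have : l = [] := List.length_eq_zero_iff.1 (Nat.le_zero.1 hl)
    subst this
    rw [parts_bst]
    simp [search_bst]
  | succ n ih =>
    intro l hl hs w
    rw [parts_bst]
    by_cases h0 : l.length = 0
    · have : l = [] := List.length_eq_zero_iff.1 h0
      subst this; simp [search_bst]
    · simp only [h0, dif_neg, not_false_iff]
      have hm : PySem.Int.floordiv (PySem.List.len l) 2 = ((l.length / 2 : Nat) : Int) := by
        rw [PySem.List.len_eq]; exact_mod_cast PySem.Int.floordiv_natCast l.length 2
      set m := l.length / 2 with hmdef
      have hmlt : m < l.length := by omega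
      have hleft : PySem.List.slice l none (some (PySem.Int.floordiv (PySem.List.len l) 2)) =
          l.take m := by rw [hm, PySem.List.slice_to_natCast]
      have hright : PySem.List.slice l (some (PySem.Int.floordiv (PySem.List.len l) 2 + 1)) none =
          l.drop (m + 1) := by
        have : PySem.Int.floordiv (PySem.List.len l) 2 + 1 = ((m + 1 : Nat) : Int) := by
          rw [hm]; push_cast; ring
        rw [this, PySem.List.slice_from_natCast]
      have hmidv : PySem.List.pyGetD l (PySem.Int.floordiv (PySem.List.len l) 2) [] = l[m] := by
        rw [hm, PySem.List.pyGetD_natCast, List.getD_eq_getElem?_getD, List.getElem?_eq_getElem hmlt,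
          Option.getD_some]
      have hdecomp : l = l.take m ++ l[m] :: l.drop (m + 1) := by
        conv_lhs => rw [← List.take_append_drop m l, List.drop_eq_getElem_cons hmlt]
      have hsplit := hdecomp ▸ hs
      rw [List.pairwise_append] at hsplit
      obtain ⟨hpre, hcons, hcross⟩ := hsplit
      rw [List.pairwise_cons] at hcons
      obtain ⟨hmidle, hpost⟩ := hcons
      have hlenpre : (l.take m).length ≤ n := by simp; omega
      have hlenpost : (l.drop (m + 1)).length ≤ n := by simp; omega
      rw [hleft, hright, hmidv, search_bst]
      split_ifs with h1 h2 h3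
      · subst h1; simp [List.getElem_mem hmlt]
      · rw [ih _ hlenpost hpost w]
        have : (w ∈ l.drop (m + 1)) ↔ w ∈ l := by
          constructor
          · intro hw; rw [hdecomp]; exact List.mem_append_right _ (List.mem_cons_of_mem _ hw)
          · intro hw
            rw [hdecomp, List.mem_append, List.mem_cons] at hw
            rcases hw with hw | hw | hw
            · exact absurd (lt_of_le_of_lt (hcross w hw l[m] List.mem_cons_self) h2) (lt_irrefl _)
            · exact absurd hw.symm h1
            · exact hw
        simp [this]
      · rw [ih _ hlenpre hpre w]
        have : (w ∈ l.take m) ↔ w ∈ l := by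
          constructor
          · intro hw; rw [hdecomp]; exact List.mem_append_left _ hw
          · intro hw
            rw [hdecomp, List.mem_append, List.mem_cons] at hw
            rcases hw with hw | hw | hw
            · exact hw
            · exact absurd hw.symm (ne_of_gt h3)
            · exact absurd (lt_of_lt_of_le h3 (hmidle w hw)) (lt_irrefl _)
        simp [this]
      · rcases lt_trichotomy (l[m]) w with h | h | h <;> [exact absurd h h2; exact absurd h h1;
          exact absurd h h3]

lemma search_parts_bst (l : List (List Char)) (hs : l.Pairwise (· ≤ ·)) (w : List Char) :
    search_bst (parts_bst l) w = decide (w ∈ l) :=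
  search_parts_bst_aux l.length l le_rfl hs w

-- A's wrapped word, normalized
def pvWrapA (w : List Char) (L i : Nat) : List Char :=
  w.take i ++ '[' :: ((w.drop i).take L ++ ']' :: w.drop (i + L))

lemma pvWrapA_length (w : List Char) (L i : Nat) (h : i + L ≤ w.length) :
    (pvWrapA w L i).length = w.length + 2 := by
  simp [pvWrapA]
  omega

lemma pvWrapA_ne (w : List Char) (L i : Nat) (h : i + L ≤ w.length) :
    pvWrapA w L i ≠ w := by
  intro he
  have := pvWrapA_length w L i h
  rw [he] at this
  omega

-- the search A performs at index i of length L is exactly pvHitB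
lemma search_slice_eq (S : List (List Char)) (hs : S.Pairwise (· ≤ ·)) (w : List Char)
    (L i : Nat) (hle : i + L ≤ w.length) :
    search_bst (parts_bst S) (PySem.List.slice w (some (i : Int)) (some ((i : Int) + (L : Int)))) =
      pvHitB S w L i := by
  rw [PySem.List.slice_natCast_add, search_parts_bst S hs, pvHitB]
  simp [hle]

lemma pvAInner_of_none (bst : PVNode) (w : List Char) (L : Int) (idxs : List Int)
    (h : ∀ i ∈ idxs, search_bst bst (PySem.List.slice w (some i) (some (i + L))) = false) :
    pvAInner bst w L idxs = none := by
  induction idxs with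
  | nil => rfl
  | cons i rest ih =>
    rw [pvAInner, h i List.mem_cons_self]
    exact ih (fun j hj => h j (List.mem_cons_of_mem _ hj))

lemma pvAInner_append_some (bst : PVNode) (w : List Char) (L : Int) (pre : List Int) (i : Int)
    (rest : List Int)
    (hpre : ∀ j ∈ pre, search_bst bst (PySem.List.slice w (some j) (some (j + L))) = false)
    (hi : search_bst bst (PySem.List.slice w (some i) (some (i + L))) = true) :
    pvAInner bst w L (pre ++ i :: rest) =
      some (PySem.List.slice w none (some i) ++
        '[' :: (PySem.List.slice w (some i) (some (i + L)) ++
        ']' :: PySem.List.slice w (some (i + L)) none)) := by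
  induction pre with
  | nil => simp [pvAInner, hi]
  | cons j pre' ih =>
    rw [List.cons_append, pvAInner, hpre j List.mem_cons_self]
    exact ih (fun j' hj' => hpre j' (List.mem_cons_of_mem _ hj'))

-- the inner loop at one length L: none if no hit, the wrap at the FIRST hit index otherwise
lemma inner_at_len (S : List (List Char)) (hs : S.Pairwise (· ≤ ·)) (w : List Char) (L : Nat) :
    pvAInner (parts_bst S) w (L : Int)
        (PySem.List.pyRange 0 ((w.length : Int) - (L : Int) + 1) 1) =
      if pvExHitB S w L = true then
        some (pvWrapA w L (pvFirstIdx S w L))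
      else none := by
  split_ifs with h
  · have hex := (pvExHitB_iff S w L).1 h
    have hfind : pvHitB S w L (Nat.find hex) = true := Nat.find_spec hex
    have hmin : ∀ j < Nat.find hex, pvHitB S w L j = false := by
      intro j hj
      simpa using Nat.find_min hex hj
    set i := Nat.find hex with hidef
    have hii : pvFirstIdx S w L = i := by rw [pvFirstIdx, dif_pos h]
    have hbound : i + L ≤ w.length := (decide_eq_true_iff.1 hfind).1
    have hrange : ((i : Int)) < (w.length : Int) - (L : Int) + 1 := by omega
    have hsplit : PySem.List.pyRange 0 ((w.length : Int) - (L : Int) + 1) 1 =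
        PySem.List.pyRange 0 (i : Int) 1 ++
          (i : Int) :: PySem.List.pyRange ((i : Int) + 1) ((w.length : Int) - (L : Int) + 1) 1 := by
      rw [PySem.List.pyRange_one_append 0 (i : Int) _ (by omega) (by omega),
        PySem.List.pyRange_one_cons hrange]
    rw [hsplit, pvAInner_append_some, hii]
    · congr 1
      rw [PySem.List.slice_to_natCast, PySem.List.slice_natCast_add, pvWrapA]
      have : (i : Int) + (L : Int) = ((i + L : Nat) : Int) := by push_cast; ring
      rw [this, PySem.List.slice_from_natCast]
    · intro j hj
      rw [PySem.List.mem_pyRange_one] at hj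
      obtain ⟨hj0, hji⟩ := hj
      have hkj : j = ((j.toNat : Nat) : Int) := by omega
      rw [hkj, search_slice_eq S hs w L j.toNat (by omega)]
      exact hmin j.toNat (by omega)
    · rw [search_slice_eq S hs w L i hbound]
      exact hfind
  · apply pvAInner_of_none
    intro j hj
    rw [PySem.List.mem_pyRange_one] at hj
    obtain ⟨hj0, hjlt⟩ := hj
    have hkj : j = ((j.toNat : Nat) : Int) := by omega
    rw [hkj, search_slice_eq S hs w L j.toNat (by omega)]
    by_contra hc
    exact h ((pvExHitB_iff S w L).2 ⟨j.toNat, by simpa using hc⟩)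

-- A's outer loop over a list of positive lengths: the wrap at the first length with a hit
lemma outer_chain (S : List (List Char)) (hs : S.Pairwise (· ≤ ·)) (w : List Char)
    (lens : List Nat) (hpos : ∀ L ∈ lens, 1 ≤ L) :
    pvAOuter (parts_bst S) w (lens.map (Nat.cast : Nat → Int)) =
      match lens.find? (pvExHitB S w) with
      | none => w
      | some L => pvWrapA w L (pvFirstIdx S w L) := by
  induction lens with
  | nil => rfl
  | cons L rest ih =>
    have hL : 1 ≤ L := hpos L List.mem_cons_self
    rw [List.map_cons, pvAOuter]
    simp only [PySem.Chars.len_eq]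
    rw [inner_at_len S hs w L]
    by_cases h : pvExHitB S w L = true
    · rw [if_pos h]
      have hi : pvFirstIdx S w L = Nat.find ((pvExHitB_iff S w L).1 h) := by
        rw [pvFirstIdx, dif_pos h]
      have hb : pvFirstIdx S w L + L ≤ w.length := by
        rw [hi]
        exact (decide_eq_true_iff.1 (Nat.find_spec ((pvExHitB_iff S w L).1 h))).1
      have hne := pvWrapA_ne w L (pvFirstIdx S w L) hb
      rw [List.find?_cons_of_pos h, Option.getD_some, if_pos hne]
    · rw [if_neg h, Option.getD_none, if_neg (by simp),
        List.find?_cons_of_neg (by simp [h])]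
      exact ih (fun L' hL' => hpos L' (List.mem_cons_of_mem _ hL'))

-- ===== B-side fold lemmas =====
def pvTr (w p : List Char) : Int × Int × List Char := (PySem.Chars.len p, PySem.Chars.find w p, p)

def pvWorse (t T : Int × Int × List Char) : Prop :=
  t.1 < T.1 ∨ (t.1 = T.1 ∧ T.2.1 < t.2.1)

lemma fold_none (w : List Char) (us : List (List Char))
    (h : ∀ p ∈ us, PySem.Chars.find w p = -1) :
    us.foldl (pvBStep w) none = none := by
  induction us with
  | nil => rfl
  | cons p rest ih =>
    rw [List.foldl_cons]
    have : pvBStep w none p = none := by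
      rw [pvBStep.eq_def]
      simp [h p List.mem_cons_self]
    rw [this]
    exact ih (fun q hq => h q (List.mem_cons_of_mem _ hq))

lemma pvBStep_skip (w p : List Char) (acc : Option (Int × Int × List Char))
    (hf : PySem.Chars.find w p = -1) : pvBStep w acc p = acc := by
  rw [pvBStep.eq_def]; simp [hf]

lemma pvBStep_found_none (w p : List Char) (hf : ¬ PySem.Chars.find w p = -1) :
    pvBStep w none p = some (pvTr w p) := by
  rw [pvBStep.eq_def]; simp [hf, pvTr]

lemma pvBStep_found_some (w p : List Char) (a b : Int) (c : List Char)
    (hf : ¬ PySem.Chars.find w p = -1) :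
    pvBStep w (some (a, b, c)) p =
      if PySem.Chars.len p > a ∨ (PySem.Chars.len p = a ∧ -(PySem.Chars.find w p) > -b) then
        some (pvTr w p)
      else some (a, b, c) := by
  rw [pvBStep.eq_def]; simp [hf, pvTr]

lemma fold_keep (w : List Char) (T : Int × Int × List Char) (us : List (List Char))
    (hub : ∀ p ∈ us, PySem.Chars.find w p ≠ -1 → pvTr w p = T ∨ pvWorse (pvTr w p) T) :
    ∀ acc, (acc = some T ∨ acc = none ∨ ∃ t, acc = some t ∧ pvWorse t T) →
    (acc = some T ∨ ∃ p ∈ us, PySem.Chars.find w p ≠ -1 ∧ pvTr w p = T) →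
    us.foldl (pvBStep w) acc = some T := by
  obtain ⟨T1, T2, T3⟩ := T
  induction us with
  | nil =>
    intro acc _ hat
    rcases hat with h | ⟨p, hp, _⟩
    · simpa using h
    · exact absurd hp List.not_mem_nil
  | cons p rest ih =>
    intro acc hinv hat
    rw [List.foldl_cons]
    have hub' : ∀ q ∈ rest, PySem.Chars.find w q ≠ -1 →
        pvTr w q = (T1, T2, T3) ∨ pvWorse (pvTr w q) (T1, T2, T3) :=
      fun q hq => hub q (List.mem_cons_of_mem _ hq)
    by_cases hf : PySem.Chars.find w p = -1
    · rw [pvBStep_skip w p acc hf]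
      apply ih hub' acc hinv
      rcases hat with h | ⟨q, hq, hqf, hqT⟩
      · exact Or.inl h
      · rcases List.mem_cons.1 hq with rfl | hq'
        · exact absurd hf hqf
        · exact Or.inr ⟨q, hq', hqf, hqT⟩
    · have hubp := hub p List.mem_cons_self hf
      -- components of the bound on p
      have hcomp : (PySem.Chars.len p = T1 ∧ PySem.Chars.find w p = T2 ∧ p = T3) ∨
          (PySem.Chars.len p < T1 ∨ (PySem.Chars.len p = T1 ∧ T2 < PySem.Chars.find w p)) := by
        rcases hubp with he | hw
        · simp only [pvTr, Prod.mk.injEq] at he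
          exact Or.inl he
        · simp only [pvWorse, pvTr] at hw
          exact Or.inr hw
      -- once the accumulator is T it stays T
      have hkeepT : pvBStep w (some (T1, T2, T3)) p = some (T1, T2, T3) := by
        rw [pvBStep_found_some w p T1 T2 T3 hf, if_neg]
        rcases hcomp with ⟨h1, h2, _⟩ | hw
        · push Not
          exact ⟨by omega, fun _ => by omega⟩
        · push Not
          rcases hw with hw | ⟨hw1, hw2⟩
          · exact ⟨by omega, fun h => absurd h (by omega)⟩
          · exact ⟨by omega, fun _ => by omega⟩
      rcases hat with haccT | ⟨q, hq, hqf, hqT⟩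
      · rw [haccT, hkeepT]
        exact ih hub' _ (Or.inl rfl) (Or.inl rfl)
      rcases List.mem_cons.1 hq with rfl | hq'
      · -- p is the achiever: after this step the accumulator IS T
        have hq1 : PySem.Chars.len q = T1 := by
          simpa using congrArg Prod.fst hqT
        have hq2 : PySem.Chars.find w q = T2 := by
          simpa using congrArg (fun x => x.2.1) hqT
        have hstepT : pvBStep w acc q = some (T1, T2, T3) := by
          rcases hinv with haccT | hacc0 | ⟨⟨t1, t2, t3⟩, hacct, htw⟩
          · rw [haccT, hkeepT]
          · rw [hacc0, pvBStep_found_none w q hqf, hqT]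
          · rw [hacct, pvBStep_found_some w q t1 t2 t3 hqf, if_pos, hqT]
            simp only [pvWorse] at htw
            rcases htw with hw | ⟨hw1, hw2⟩
            · exact Or.inl (by omega)
            · exact Or.inr ⟨by omega, by omega⟩
        rw [hstepT]
        exact ih hub' _ (Or.inl rfl) (Or.inl rfl)
      · -- achiever in the tail: the step preserves the invariant
        have hinv' : pvBStep w acc p = some (T1, T2, T3) ∨ pvBStep w acc p = none ∨
            ∃ t, pvBStep w acc p = some t ∧ pvWorse t (T1, T2, T3) := by
          have hself : pvTr w p = (T1, T2, T3) ∨ pvWorse (pvTr w p) (T1, T2, T3) := hubp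
          rcases hinv with haccT | hacc0 | ⟨⟨t1, t2, t3⟩, hacct, htw⟩
          · rw [haccT, hkeepT]
            exact Or.inl rfl
          · rw [hacc0, pvBStep_found_none w p hf]
            rcases hself with he | hw
            · exact Or.inl (by rw [he])
            · exact Or.inr (Or.inr ⟨pvTr w p, rfl, hw⟩)
          · rw [hacct, pvBStep_found_some w p t1 t2 t3 hf]
            split_ifs with hc
            · rcases hself with he | hw
              · exact Or.inl (by rw [he])
              · exact Or.inr (Or.inr ⟨pvTr w p, rfl, hw⟩)
            · exact Or.inr (Or.inr ⟨(t1, t2, t3), rfl, htw⟩)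
        exact ih hub' _ hinv' (Or.inr ⟨q, hq', hqf, hqT⟩)

lemma pvLens_mem (L : Nat) : L ∈ ([6, 5, 4, 3, 2, 1] : List Nat) ↔ 1 ≤ L ∧ L ≤ 6 := by
  simp
  omega

lemma hit_of_prefix (S : List (List Char)) (w p : List Char) (j : Nat)
    (hp : p ∈ S) (hpre : p <+: w.drop j) (hp1 : 1 ≤ p.length) :
    pvHitB S w p.length j = true := by
  rw [pvHitB, decide_eq_true_iff]
  have hlen : j + p.length ≤ w.length := by
    have := hpre.length_le
    simp only [List.length_drop] at this
    omega
  refine ⟨hlen, ?_⟩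
  rw [← List.prefix_iff_eq_take.mp hpre]
  exact hp

lemma usable_spec (S : List (List Char)) (p : List Char) :
    p ∈ S.filter (fun p => decide (1 ≤ PySem.Chars.len p ∧ PySem.Chars.len p ≤ 6)) ↔
      p ∈ S ∧ 1 ≤ p.length ∧ p.length ≤ 6 := by
  rw [List.mem_filter, decide_eq_true_iff, PySem.Chars.len_eq]
  constructor
  · rintro ⟨h1, h2, h3⟩; exact ⟨h1, by omega, by omega⟩
  · rintro ⟨h1, h2, h3⟩; exact ⟨h1, by omega, by omega⟩

lemma pvSorted_inst (xs : List (List Char)) :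
    @PySem.List.sorted (List Char) (List Char) List.instLT (fun a b => a.decidableLT b) xs (fun x => x) false =
    @PySem.List.sorted (List Char) (List Char) List.instLinearOrder.toLT LinearOrder.toDecidableLT xs (fun x => x) false := by
  rw [@PySem.List.sorted_eq_foldl_insertBy (List Char) (List Char) List.instLT (fun a b => a.decidableLT b),
      @PySem.List.sorted_eq_foldl_insertBy (List Char) (List Char) List.instLinearOrder.toLT LinearOrder.toDecidableLT]
  congr 1
  funext acc x
  congr 1
  funext a b
  rw [decide_eq_decide]

-- the per-word equivalence: A's scan result = B's best-candidate result
lemma word_main (parts : List String) (w : List Char) :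
    pvAOuter (parts_bst (PySem.List.sorted (parts.map String.toList) (fun x => x) false)) w
        (PySem.List.pyRange 6 0 (-1)) =
      pvBWord w ((PySem.List.sorted (parts.map String.toList) (fun x => x) false).filter
        (fun p => decide (1 ≤ PySem.Chars.len p ∧ PySem.Chars.len p ≤ 6))) := by
  rw [pvSorted_inst]
  set S := @PySem.List.sorted (List Char) (List Char) List.instLinearOrder.toLT
    LinearOrder.toDecidableLT (parts.map String.toList) (fun x => x) false with hS
  have hs : S.Pairwise (· ≤ ·) := by
    have := PySem.List.sorted_pairwise (parts.map String.toList) (fun x => x)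
    exact this
  have hlens : PySem.List.pyRange 6 0 (-1) =
      (([6, 5, 4, 3, 2, 1] : List Nat)).map (Nat.cast : Nat → Int) := by decide
  rw [hlens, outer_chain S hs w _ (fun L hL => ((pvLens_mem L).1 hL).1)]
  set usable := S.filter (fun p => decide (1 ≤ PySem.Chars.len p ∧ PySem.Chars.len p ≤ 6))
    with hU
  cases hfind : ([6, 5, 4, 3, 2, 1] : List Nat).find? (pvExHitB S w) with
  | none =>
    have hno := List.find?_eq_none.1 hfind
    have hnofind : ∀ p ∈ usable, PySem.Chars.find w p = -1 := by
      intro p hp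
      by_contra hne
      obtain ⟨hpS, hp1, hp6⟩ := (usable_spec S p).1 hp
      have hpos : 0 ≤ PySem.Chars.find w p := by
        have := PySem.Chars.neg_one_le_find w p
        omega
      have hpre := (PySem.Chars.find_spec hpos).1
      have hhit := hit_of_prefix S w p ((PySem.Chars.find w p).toNat) hpS hpre (by omega)
      exact hno p.length ((pvLens_mem p.length).2 ⟨hp1, hp6⟩)
        ((pvExHitB_iff S w p.length).2 ⟨_, hhit⟩)
    rw [pvBWord.eq_def, fold_none w usable hnofind]
  | some Lstar =>
    obtain ⟨hLpred, as, bs, hdec, hbefore⟩ := List.find?_eq_some_iff_append.1 hfind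
    have hLmem : Lstar ∈ ([6, 5, 4, 3, 2, 1] : List Nat) := by
      rw [hdec]; exact List.mem_append_right _ List.mem_cons_self
    obtain ⟨hL1, hL6⟩ := (pvLens_mem Lstar).1 hLmem
    -- maximality: no hits for any larger usable length
    have hmax : ∀ L, Lstar < L → L ≤ 6 → pvExHitB S w L = false := by
      intro L hLgt hLle
      have hLm : L ∈ ([6, 5, 4, 3, 2, 1] : List Nat) := (pvLens_mem L).2 ⟨by omega, hLle⟩
      rw [hdec] at hLm
      have hpw : (([6, 5, 4, 3, 2, 1] : List Nat)).Pairwise (· > ·) := by decide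
      rw [hdec, List.pairwise_append] at hpw
      rcases List.mem_append.1 hLm with hin | hin
      · simpa using hbefore L hin
      · rcases List.mem_cons.1 hin with rfl | hin
        · omega
        · have := (List.pairwise_cons.1 hpw.2.1).1 L hin
          omega
    have hex := (pvExHitB_iff S w Lstar).1 hLpred
    set istar := pvFirstIdx S w Lstar with histar
    have histar' : istar = Nat.find hex := by rw [histar, pvFirstIdx, dif_pos hLpred]
    have hhit : pvHitB S w Lstar istar = true := by rw [histar']; exact Nat.find_spec hex
    have hmin : ∀ j < istar, pvHitB S w Lstar j = false := by
      intro j hj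
      rw [histar'] at hj
      simpa using Nat.find_min hex hj
    obtain ⟨hb, hqS⟩ := decide_eq_true_iff.1 hhit
    set q := (w.drop istar).take Lstar with hq
    have hqlen : q.length = Lstar := by
      rw [hq, List.length_take, List.length_drop]
      omega
    have hocc : q <+: w.drop istar := List.take_prefix _ _
    -- find w q = istar
    have hfq0 : 0 ≤ PySem.Chars.find w q := by
      rw [PySem.Chars.find_nonneg_iff, ← PySem.Chars.isIn_iff_infix,
        ← PySem.Chars.exists_prefix_drop_iff_isIn]
      exact ⟨istar, hocc⟩
    have hfq : PySem.Chars.find w q = (istar : Int) := by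
      obtain ⟨hfpre, hfmin⟩ := PySem.Chars.find_spec hfq0
      set f := (PySem.Chars.find w q).toNat with hfdef
      have hcase : f = istar := by
        by_contra hne
        rcases Nat.lt_or_ge f istar with hlt | hge
        · have := hit_of_prefix S w q f hqS hfpre (by omega)
          rw [hqlen] at this
          rw [hmin f hlt] at this
          exact absurd this (by simp)
        · exact hfmin istar (by omega) hocc
      omega
    -- every found usable part is the optimum or strictly worse
    have hub : ∀ p ∈ usable, PySem.Chars.find w p ≠ -1 →
        pvTr w p = ((Lstar : Int), (istar : Int), q) ∨
          pvWorse (pvTr w p) ((Lstar : Int), (istar : Int), q) := by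
      intro p hp hne
      obtain ⟨hpS, hp1, hp6⟩ := (usable_spec S p).1 hp
      have hpos : 0 ≤ PySem.Chars.find w p := by
        have := PySem.Chars.neg_one_le_find w p
        omega
      obtain ⟨hppre, hpmin⟩ := PySem.Chars.find_spec hpos
      set j := (PySem.Chars.find w p).toNat with hjdef
      have hphit := hit_of_prefix S w p j hpS hppre (by omega)
      have hple : p.length ≤ Lstar := by
        by_contra hgt
        have := hmax p.length (by omega) hp6
        rw [(pvExHitB_iff S w p.length).2 ⟨j, hphit⟩] at this
        exact absurd this (by simp)
      rcases Nat.lt_or_ge p.length Lstar with hlt | hgecase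
      · exact Or.inr (Or.inl (by simp [pvTr, PySem.Chars.len_eq]; omega))
      · have hpeq : p.length = Lstar := by omega
        have hjhit : pvHitB S w Lstar j = true := by rw [← hpeq]; exact hphit
        have hjge : istar ≤ j := by
          by_contra hjlt
          rw [hmin j (by omega)] at hjhit
          exact absurd hjhit (by simp)
        rcases Nat.lt_or_ge istar j with hjgt | hjle
        · refine Or.inr (Or.inr ⟨by simp [pvTr, PySem.Chars.len_eq]; omega, ?_⟩)
          simp only [pvTr]
          omega
        · have hjeq : j = istar := by omega
          left
          have hpq : p = q := by
            rw [hq, ← hjeq, ← hpeq]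
            exact List.prefix_iff_eq_take.mp hppre
          rw [pvTr, PySem.Chars.len_eq, hpeq, hpq, hfq]
      -- done
    have hach : q ∈ usable := (usable_spec S q).2 ⟨hqS, by omega, by omega⟩
    have hfold : usable.foldl (pvBStep w) none = some ((Lstar : Int), (istar : Int), q) := by
      apply fold_keep w _ usable hub none (Or.inr (Or.inl rfl))
      refine Or.inr ⟨q, hach, by rw [hfq]; omega, ?_⟩
      rw [pvTr, PySem.Chars.len_eq, hqlen, hfq]
    rw [pvBWord.eq_def, hfold]
    simp only []
    rw [PySem.List.slice_to_natCast, pvWrapA]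
    have : (istar : Int) + (Lstar : Int) = ((istar + Lstar : Nat) : Int) := by push_cast; ring
    rw [this, PySem.List.slice_from_natCast]

-- ===== VERDICT (by name: the statement is the Claim_ definition above) =====
theorem solution_spec : Claim_equal_solution := by
  unfold Claim_equal_solution
  intro words parts _hdom
  unfold Spec_solution solution solution_alt
  simp only [PySem.List.foldl_append_singleton_eq_map, List.nil_append]
  apply List.map_congr_left
  intro word _
  have h6 : (5 : Int) + 1 = 6 := by norm_num
  rw [h6]
  exact congrArg String.ofList (word_main parts word.toList)
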